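-- pv_equiv track=rewrite | github.com/OdedCas/mytools-pyrevit | MyTools.tab/Create.panel/C2Rv5.pushbutton/script.py | normalize_name_key
-- ===== SOURCE A (Python) =====
-- def normalize_name_key(txt):
--     if txt is None:
--         return ""
--     try:
--         s = txt.lower()
--     except Exception:
--         try:
--             s = str(txt).lower()
--         except Exception:
--             return ""
--     for ch in [" ", "-", "_", "\t", "\r", "\n"]:
--         s = s.replace(ch, "")
--     return s
-- ===== SOURCE B (Python) =====
-- SEPS = {" ", "-", "_", "\t", "\r", "\n"}
--
-- def normalize_name_key(txt):
--     if txt is None: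
--         return ""
--     try:
--         s = txt.lower()
--     except Exception:
--         try:
--             s = str(txt).lower()
--         except Exception:
--             return ""
--     return "".join(c for c in s if c not in SEPS)
-- ===== Notes on version B (the rewrite author's own statement) =====
-- stated objective: idiomatic
-- what changed: The six sequential str.replace passes (one full scan of the string per separator) are replaced by a single character-level pass that filters out any char belonging to a separator set.
import Mathlib
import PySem

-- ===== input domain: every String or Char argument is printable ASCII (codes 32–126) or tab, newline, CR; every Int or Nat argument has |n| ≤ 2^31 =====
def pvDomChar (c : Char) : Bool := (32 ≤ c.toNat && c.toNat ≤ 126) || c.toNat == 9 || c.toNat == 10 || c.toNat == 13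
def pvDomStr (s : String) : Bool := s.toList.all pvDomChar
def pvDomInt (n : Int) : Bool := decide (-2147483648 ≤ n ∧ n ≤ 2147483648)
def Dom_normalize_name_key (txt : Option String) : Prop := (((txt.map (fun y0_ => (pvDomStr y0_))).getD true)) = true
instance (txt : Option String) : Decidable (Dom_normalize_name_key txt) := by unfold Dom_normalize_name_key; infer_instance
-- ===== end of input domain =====

-- B replaces A's six sequential str.replace passes by one character-level filter against a separator set (idiomatic single pass).

-- ===== PORT A =====
-- txt is Option String; on a str, .lower() never raises, so the try/except preamble
-- always takes the first branch: none → "", some t → s = t.lower().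
def normalize_name_key (txt : Option String) : String :=
  match txt with
  | none => ""
  | some t =>
    let s := PySem.Str.lower t
    String.ofList (([" ", "-", "_", "\t", "\r", "\n"].foldl
      (fun l ch => PySem.Chars.replace l ch.toList ("" : String).toList) s.toList))

-- ===== PORT B =====
def pvSeps : PySem.Set Char := PySem.Set.ofList [' ', '-', '_', '\t', '\r', '\n']

def normalize_name_key_alt (txt : Option String) : String :=
  match txt with
  | none => ""
  | some t =>
    let s := PySem.Str.lower t
    String.ofList (s.toList.filter (fun c => !(PySem.Set.contains pvSeps c)))

-- ===== PRECONDITION & SPEC =====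
def Spec_normalize_name_key (txt : Option String) (out : String) : Prop := out = normalize_name_key_alt txt
instance (txt : Option String) (out : String) : Decidable (Spec_normalize_name_key txt out) := by unfold Spec_normalize_name_key; infer_instance

-- ===== CLAIM (what is proved, stated in full; the proofs are below) =====
def Claim_equal_normalize_name_key : Prop := ∀ (txt : Option String), Dom_normalize_name_key txt → Spec_normalize_name_key txt (normalize_name_key txt)

-- ===== LEMMAS AND PROOFS =====

theorem go_single (c : Char) : ∀ (fuel : Nat) (l acc : List Char), l.length ≤ fuel →
    PySem.Chars.replace.go [c] [] fuel l acc = acc.reverse ++ l.filter (fun x => !(x == c)) := by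
  intro fuel
  induction fuel with
  | zero => intro l acc h; cases l with
    | nil => simp [PySem.Chars.replace.go]
    | cons a t => simp at h
  | succ n ih =>
    intro l acc h
    cases l with
    | nil => simp [PySem.Chars.replace.go]
    | cons a t =>
      by_cases hc : a = c
      · subst hc
        have : List.isPrefixOf [a] (a :: t) = true := by simp [List.isPrefixOf]
        simp [PySem.Chars.replace.go, this, ih t acc (by simpa using h)]
      · have : List.isPrefixOf [c] (a :: t) = false := by
          simp [List.isPrefixOf]; exact fun h => absurd h.symm hc
        simp [PySem.Chars.replace.go, this, hc, ih t (a :: acc) (by simpa using h)]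

theorem replace_single (c : Char) (l : List Char) :
    PySem.Chars.replace l [c] [] = l.filter (fun x => !(x == c)) := by
  simp [PySem.Chars.replace, go_single c l.length l [] le_rfl]

theorem sep_pred (x : Char) :
    (!(x == '\n') && (!(x == '\r') && (!(x == '\t') && (!(x == '_') && (!(x == '-') && !(x == ' '))))))
      = !(PySem.Set.contains pvSeps x) := by
  by_cases h1 : x = ' ' <;> by_cases h2 : x = '-' <;> by_cases h3 : x = '_' <;>
    by_cases h4 : x = '\t' <;> by_cases h5 : x = '\r' <;> by_cases h6 : x = '\n' <;>
      simp_all [pvSeps, PySem.Set.contains, PySem.Set.ofList, PySem.Set.add, PySem.Set.empty]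

-- ===== VERDICT (by name: the statement is the Claim_ definition above) =====
theorem normalize_name_key_spec : Claim_equal_normalize_name_key := by
  intro txt _
  unfold Spec_normalize_name_key normalize_name_key normalize_name_key_alt
  cases txt with
  | none => rfl
  | some t =>
    simp only [List.foldl]
    simp only [show (" ":String).toList = [' '] from rfl, show ("-":String).toList = ['-'] from rfl,
      show ("_":String).toList = ['_'] from rfl, show ("\t":String).toList = ['\t'] from rfl,
      show ("\r":String).toList = ['\r'] from rfl, show ("\n":String).toList = ['\n'] from rfl,
      show ("":String).toList = [] from rfl]
    simp only [replace_single, List.filter_filter]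
    congr 1
    apply List.filter_congr
    intro x _
    exact sep_pred x
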